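-- pv_equiv track=rewrite | github.com/pjkundert/python-slip39 | slip39/util.py | round_onto
-- ===== SOURCE A (Python) =====
-- def round_onto( value, keys, keep_sign=True ):
--     """Find the numeric key closest to value, maintaining sign if possible.  None and other
--     non-numeric values are supported if they are present in keys.
--
--     """
--     if value in keys:
--         return value
--     keys			= sorted( k for k in keys if type(k) in (float,int) )
--     near, near_i		= min(
--         (abs( k - value), i)
--         for i, k in enumerate( keys )
--     )
--     if keep_sign and (( value < 0 ) != ( keys[near_i] < 0 )):
--         # The sign differs; if value -'ve but closest was +'ve, and there is a lower key available
--         if value < 0: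
--             if near_i > 0:
--                 near_i	       -= 1
--         else:
--             if near_i + 1 < len( keys ):
--                 near_i	       += 1
--     return keys[near_i]
-- ===== SOURCE B (Python) =====
-- def round_onto( value, keys, keep_sign=True ):
--     """Nearest numeric key to value, found in linear scans instead of sorting.
--
--     The nearest key (ties broken toward the smaller key, as sorting does) is
--     found by one min() pass; the keep_sign adjustment steps to the closest key
--     on the other side of it, found by one more filtered max()/min() pass.
--     """
--     if value in keys:
--         return value
--     nums			= [ k for k in keys if type(k) in (float,int) ]
--     best			= min( nums, key=lambda k: (abs( k - value ), k) )
--     if not keep_sign or ( value < 0 ) == ( best < 0 ):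
--         return best
--     if value < 0:
--         return max( ( k for k in nums if k < best ), default=best )
--     return min( ( k for k in nums if k > best ), default=best )
-- ===== Notes on version B (the rewrite author's own statement) =====
-- stated objective: alternative
-- what changed: replaces sort + lexicographic argmin over (distance, index) pairs + index-neighbour arithmetic by linear scans: one min() pass with key (abs(k-value), k) finds the nearest key, and the keep_sign adjustment is one filtered max()/min() pass for the closest key on the other side
-- intended difference: when keep_sign is set, value >= 0 is absent from keys and the nearest key is negative, duplicated and has some larger key, A's one-slot step in the sorted list lands on the duplicate and returns the negative nearest key again, while B returns the smallest key larger than it, the intended move toward value's sign. — e.g. on round_onto(1, [-2, -2, 5], true): A returns -2, B returns 5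
import Mathlib
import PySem

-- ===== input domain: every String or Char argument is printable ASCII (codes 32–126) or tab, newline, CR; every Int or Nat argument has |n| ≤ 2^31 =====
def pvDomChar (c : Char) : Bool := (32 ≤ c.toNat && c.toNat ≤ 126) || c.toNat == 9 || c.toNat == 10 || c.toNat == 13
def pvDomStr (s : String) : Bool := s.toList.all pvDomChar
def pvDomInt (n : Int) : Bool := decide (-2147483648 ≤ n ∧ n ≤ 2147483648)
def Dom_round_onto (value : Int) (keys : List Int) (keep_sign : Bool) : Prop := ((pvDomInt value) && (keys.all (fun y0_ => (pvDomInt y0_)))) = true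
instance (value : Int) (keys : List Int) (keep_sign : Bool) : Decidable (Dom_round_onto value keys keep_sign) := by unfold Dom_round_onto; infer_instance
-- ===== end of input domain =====

-- B replaces A's sort-then-index-arithmetic by linear min/max scans (one lex-min pass, then one
-- filtered neighbour pass); on the D_ corner below B steps to the next larger key where A re-returns
-- a duplicated negative key.

-- ===== PORT A =====
def round_onto (value : Int) (keys : List Int) (keep_sign : Bool) : Int :=
  if value ∈ keys then value
  else
    -- 'k for k in keys if type(k) in (float,int)': every Int passes the type filter
    let ks := PySem.List.sorted keys (fun k => k) false
    -- min((abs(k - value), i) for i, k in enumerate(keys)): lexicographic min of the pairs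
    match PySem.List.min2? ((PySem.List.enumerate ks).map (fun ik => (|ik.2 - value|, ik.1)))
        (fun p => p.1) (fun p => p.2) with
    | none => 0  -- min() of the empty generator raises ValueError: excluded by Pre_round_onto
    | some di =>
      let near_i :=
        if keep_sign && (decide (value < 0) != decide (PySem.List.pyGetD ks di.2 0 < 0)) then
          if value < 0 then (if di.2 > 0 then di.2 - 1 else di.2)
          else (if di.2 + 1 < (ks.length : Int) then di.2 + 1 else di.2)
        else di.2
      PySem.List.pyGetD ks near_i 0

-- ===== PORT B =====
def round_onto_alt (value : Int) (keys : List Int) (keep_sign : Bool) : Int :=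
  if value ∈ keys then value
  else
    -- 'nums = [k for k in keys if type(k) in (float,int)]': every Int passes the type filter
    match PySem.List.min2? keys (fun k => |k - value|) (fun k => k) with
    | none => 0  -- min() of [] raises ValueError: excluded by Pre_round_onto
    | some best =>
      if !keep_sign || (decide (value < 0) == decide (best < 0)) then best
      else if value < 0 then
        PySem.List.maxD (keys.filter (fun k => decide (k < best))) (fun k => k) best
      else
        PySem.List.minD (keys.filter (fun k => decide (best < k))) (fun k => k) best

-- ===== PRECONDITION & SPEC =====
-- Python A raises ValueError (min() of an empty sequence) exactly when keys = [] and value ∉ keys.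
-- We simply require keys ≠ [] (value ∈ [] is impossible, so this excludes nothing A returns on).
def Pre_round_onto (value : Int) (keys : List Int) (keep_sign : Bool) : Prop := keys ≠ []
instance (value : Int) (keys : List Int) (keep_sign : Bool) : Decidable (Pre_round_onto value keys keep_sign) := by unfold Pre_round_onto; infer_instance
def pvWitness_round_onto : Int × List Int × Bool := (3, [-5, 2], true)

-- With keep_sign on, a non-negative value whose nearest key `b` is negative and duplicated, while a
-- key larger than `b` exists: A steps one slot in the sorted list, lands on the duplicate and returns
-- the negative key `b` again, whereas B returns the smallest key larger than `b` — the intended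
-- "move toward the value's sign" behaviour.  (Given b < 0 ≤ value, `b is the nearest key, ties
-- toward the smaller` is equivalent to: every key j lies at or below b, or at least value - b above value.)
def D_round_onto (value : Int) (keys : List Int) (keep_sign : Bool) : Prop :=
  keep_sign = true ∧ 0 ≤ value ∧ value ∉ keys ∧ ∃ b ∈ keys,
    b < 0 ∧ 2 ≤ keys.count b ∧ (∃ k ∈ keys, b < k) ∧ ∀ j ∈ keys, j ≤ b ∨ 2 * value - b ≤ j
instance (value : Int) (keys : List Int) (keep_sign : Bool) : Decidable (D_round_onto value keys keep_sign) := by unfold D_round_onto; infer_instance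

def Spec_round_onto (value : Int) (keys : List Int) (keep_sign : Bool) (out : Int) : Prop := ¬ D_round_onto value keys keep_sign → out = round_onto_alt value keys keep_sign
instance (value : Int) (keys : List Int) (keep_sign : Bool) (out : Int) : Decidable (Spec_round_onto value keys keep_sign out) := by unfold Spec_round_onto; infer_instance

def pvDiffWitness_round_onto : Int × List Int × Bool := (1, [-2, -2, 5], true)
def pvDiffWitnessOut_round_onto : Int × Int := (-2, 5)

-- ===== CLAIM (what is proved, stated in full; the proofs are below) =====
def Claim_unchanged_round_onto : Prop := ∀ (value : Int) (keys : List Int) (keep_sign : Bool), Dom_round_onto value keys keep_sign → Pre_round_onto value keys keep_sign → Spec_round_onto value keys keep_sign (round_onto value keys keep_sign)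
def Claim_changed_round_onto : Prop := Dom_round_onto (pvDiffWitness_round_onto.1) (pvDiffWitness_round_onto.2.1) (pvDiffWitness_round_onto.2.2) ∧ Pre_round_onto (pvDiffWitness_round_onto.1) (pvDiffWitness_round_onto.2.1) (pvDiffWitness_round_onto.2.2) ∧ D_round_onto (pvDiffWitness_round_onto.1) (pvDiffWitness_round_onto.2.1) (pvDiffWitness_round_onto.2.2) ∧ round_onto (pvDiffWitness_round_onto.1) (pvDiffWitness_round_onto.2.1) (pvDiffWitness_round_onto.2.2) = pvDiffWitnessOut_round_onto.1 ∧ round_onto_alt (pvDiffWitness_round_onto.1) (pvDiffWitness_round_onto.2.1) (pvDiffWitness_round_onto.2.2) = pvDiffWitnessOut_round_onto.2 ∧ pvDiffWitnessOut_round_onto.1 ≠ pvDiffWitnessOut_round_onto.2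
def Claim_exact_round_onto : Prop := ∀ (value : Int) (keys : List Int) (keep_sign : Bool), Dom_round_onto value keys keep_sign → Pre_round_onto value keys keep_sign → D_round_onto value keys keep_sign → round_onto value keys keep_sign ≠ round_onto_alt value keys keep_sign

-- ===== LEMMAS AND PROOFS =====

-- characterization of PySem.List.min2? (the library states none): the result is a member that is
-- lexicographically minimal under the pair of keys.
theorem min2_go {α : Type} (k1 k2 : α → Int) (xs : List α) : ∀ (a : α),
    ∃ m, List.foldl
      (fun acc x =>
        match acc with
        | none => some x
        | some m =>
          if (decide (k1 x < k1 m) || !decide (k1 m < k1 x) && decide (k2 x < k2 m)) = true then some x else some m)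
      (some a) xs = some m ∧ (m = a ∨ m ∈ xs) ∧
      (k1 m < k1 a ∨ (k1 m = k1 a ∧ k2 m ≤ k2 a)) ∧
      ∀ y ∈ xs, k1 m < k1 y ∨ (k1 m = k1 y ∧ k2 m ≤ k2 y) := by
  induction xs with
  | nil => intro a; exact ⟨a, rfl, Or.inl rfl, Or.inr ⟨rfl, le_refl _⟩, by simp⟩
  | cons x xs ih =>
    intro a
    by_cases h : (decide (k1 x < k1 a) || !decide (k1 a < k1 x) && decide (k2 x < k2 a)) = true
    · obtain ⟨m, hm, hmem, hle, hall⟩ := ih x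
      refine ⟨m, ?_, ?_, ?_, ?_⟩
      · simpa [List.foldl, h] using hm
      · rcases hmem with rfl | hmem
        · exact Or.inr (List.mem_cons_self)
        · exact Or.inr (List.mem_cons_of_mem _ hmem)
      · simp only [Bool.or_eq_true, Bool.and_eq_true, Bool.not_eq_eq_eq_not, Bool.not_true,
          decide_eq_true_eq, decide_eq_false_iff_not] at h
        rcases h with h | ⟨h1, h2⟩
        · rcases hle with h' | ⟨h1', h2'⟩ <;> exact Or.inl (by omega)
        · rcases hle with h' | ⟨h1', h2'⟩
          · exact Or.inl (by omega)
          · by_cases hxa : k1 x < k1 a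
            · exact Or.inl (by omega)
            · exact Or.inr ⟨by omega, by omega⟩
      · intro y hy
        rcases List.mem_cons.mp hy with rfl | hy
        · exact hle
        · exact hall y hy
    · obtain ⟨m, hm, hmem, hle, hall⟩ := ih a
      refine ⟨m, ?_, ?_, hle, ?_⟩
      · simpa [List.foldl, h] using hm
      · rcases hmem with rfl | hmem
        · exact Or.inl rfl
        · exact Or.inr (List.mem_cons_of_mem _ hmem)
      · intro y hy
        simp only [Bool.or_eq_true, Bool.and_eq_true, Bool.not_eq_eq_eq_not, Bool.not_true,
          decide_eq_true_eq, decide_eq_false_iff_not] at h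
        push_neg at h
        rcases List.mem_cons.mp hy with rfl | hy
        · rcases hle with h' | ⟨h1', h2'⟩
          · constructor; omega
          · by_cases hxa : k1 a < k1 y
            · exact Or.inl (by omega)
            · have := h.2 (by omega)
              exact Or.inr ⟨by omega, by omega⟩
        · exact hall y hy


theorem min2?_spec {α : Type} (xs : List α) (hxs : xs ≠ []) (k1 k2 : α → Int) :
    ∃ m, PySem.List.min2? xs k1 k2 = some m ∧ m ∈ xs ∧
      ∀ y ∈ xs, k1 m < k1 y ∨ (k1 m = k1 y ∧ k2 m ≤ k2 y) := by
  obtain ⟨x, xs, rfl⟩ := List.exists_cons_of_ne_nil hxs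
  obtain ⟨m, hm, hmem, hle, hall⟩ := min2_go k1 k2 xs x
  refine ⟨m, ?_, ?_, ?_⟩
  · simpa [PySem.List.min2?, List.foldl] using hm
  · rcases hmem with rfl | hmem
    · exact List.mem_cons_self
    · exact List.mem_cons_of_mem _ hmem
  · intro y hy
    rcases List.mem_cons.mp hy with rfl | hy
    · exact hle
    · exact hall y hy

-- a duplicated getElem pair forces count ≥ 2
theorem count_two (s : List Int) (i : Nat) (h1 : i + 1 < s.length) (b : Int)
    (hb1 : s[i]'(by omega) = b) (hb2 : s[i+1]'h1 = b) : 2 ≤ s.count b := by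
  conv_rhs => rw [← List.take_append_drop (i+1) s]
  rw [List.count_append, List.drop_eq_getElem_cons h1, hb2, List.count_cons_self]
  have h2 : b ∈ List.take (i+1) s := by
    rw [List.mem_take_iff_getElem]
    exact ⟨i, by omega, hb1⟩
  have h3 := List.one_le_count_iff.mpr h2
  omega

-- if no other index carries the value s[i], its count is at most 1
theorem count_le_one (s : List Int) (i : Nat) (hi : i < s.length) (b : Int) (hbi : s[i]'hi = b)
    (hlow : ∀ j (hj : j < s.length), j < i → s[j] ≠ b)
    (hhigh : ∀ j (hj : j < s.length), i < j → s[j] ≠ b) : s.count b ≤ 1 := by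
  conv_lhs => rw [← List.take_append_drop i s]
  rw [List.count_append, List.drop_eq_getElem_cons hi, hbi, List.count_cons_self]
  have h1 : List.count b (List.take i s) = 0 := by
    rw [List.count_eq_zero]
    intro hmem
    obtain ⟨j, hj, hje⟩ := List.mem_take_iff_getElem.mp hmem
    exact hlow j (by omega) (by omega) hje
  have h2 : List.count b (List.drop (i+1) s) = 0 := by
    rw [List.count_eq_zero]
    intro hmem
    obtain ⟨j, hj, hje⟩ := List.mem_iff_getElem.mp hmem
    rw [List.getElem_drop] at hje
    exact hhigh (i+1+j) (by simp at hj; omega) (by omega) hje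
  omega

-- the shared anatomy of both ports on value ∉ keys, keys ≠ []: A picks index i in the sorted
-- list, B picks the same key s[i]; s[i] is the lex-(abs,key) minimum and i its first occurrence.
theorem anatomy (value : Int) (keys s : List Int)
    (hs : s = PySem.List.sorted keys (fun k => k) false)
    (hne : keys ≠ []) :
    ∃ (i : Nat) (hi : i < s.length),
      PySem.List.min2? ((PySem.List.enumerate s).map (fun ik => (|ik.2 - value|, ik.1)))
          (fun p => p.1) (fun p => p.2) = some (|s[i] - value|, (i : Int)) ∧
      PySem.List.min2? keys (fun k => |k - value|) (fun k => k) = some (s[i]'hi) ∧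
      (∀ y ∈ keys, |s[i] - value| < |y - value| ∨ (|s[i] - value| = |y - value| ∧ s[i] ≤ y)) ∧
      (∀ j (hj : j < s.length), j < i → s[j] < s[i]) ∧
      (∀ j (hj : j < s.length), i ≤ j → s[i] ≤ s[j]) := by
  have hsne : s ≠ [] := by
    rw [hs, Ne, PySem.List.sorted_eq_nil_iff]; exact hne
  have hmemS : ∀ z : Int, z ∈ s ↔ z ∈ keys := by
    intro z; rw [hs]; exact PySem.List.mem_sorted keys (fun k => k) false z
  have hmono : ∀ p q (hpq : p ≤ q) (hq : q < s.length), s[p]'(by omega) ≤ s[q]'hq := by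
    intro p q hpq hq
    subst hs
    exact PySem.List.sorted_id_getElem_mono keys hpq hq
  -- A's lexicographic minimum over (abs, index) pairs
  have hLne : ((PySem.List.enumerate s).map (fun ik => (|ik.2 - value|, ik.1))) ≠ [] := by
    simp [PySem.List.enumerate_eq_zipIdx_map, hsne]
  obtain ⟨m, hmA, hmemA, hallA⟩ := min2?_spec _ hLne (fun p : Int × Int => p.1) (fun p => p.2)
  obtain ⟨p, hp, hfp⟩ := List.mem_map.mp hmemA
  obtain ⟨i, hi, rfl⟩ := (PySem.List.mem_enumerate_iff s 0 p).mp hp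
  have hm_eq : m = (|s[i] - value|, (i : Int)) := by
    rw [← hfp]; simp
  subst hm_eq
  -- index-wise minimality
  have hminA : ∀ j (hj : j < s.length),
      |s[i] - value| < |s[j] - value| ∨ (|s[i] - value| = |s[j] - value| ∧ i ≤ j) := by
    intro j hj
    have hjm : ((0 : Int) + (j : Int), s[j]) ∈ PySem.List.enumerate s 0 :=
      (PySem.List.mem_enumerate_iff s 0 _).mpr ⟨j, hj, rfl⟩
    have := hallA _ (List.mem_map.mpr ⟨_, hjm, rfl⟩)
    simp only at this
    rcases this with h | ⟨h1, h2⟩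
    · exact Or.inl h
    · exact Or.inr ⟨h1, by omega⟩
  -- B's lexicographic minimum over the keys
  obtain ⟨best, hmB, hmemB, hallB⟩ := min2?_spec keys hne (fun k => |k - value|) (fun k => k)
  -- best = s[i]
  have hbK : s[i] ∈ keys := (hmemS _).mp (List.getElem_mem hi)
  obtain ⟨jb, hjb, hjbe⟩ := List.mem_iff_getElem.mp ((hmemS best).mpr hmemB)
  have h1 := hallB _ hbK
  have h2 := hminA jb hjb
  rw [hjbe] at h2
  have habs : |best - value| = |s[i] - value| := by omega
  have hij : i ≤ jb := by
    rcases h2 with h | ⟨_, h⟩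
    · omega
    · exact h
  have hbb : best = s[i] := by
    have hle1 : best ≤ s[i] := by rcases h1 with h | ⟨_, h⟩ <;> omega
    have hle2 : s[i] ≤ s[jb] := hmono i jb hij hjb
    omega
  subst hbb
  refine ⟨i, hi, hmA, hmB, hallB, ?_, fun j hj hij' => hmono i j hij' hj⟩
  intro j hj hji
  have hle := hmono j i (by omega) hi
  rcases hminA j hj with h | ⟨_, h⟩
  · rcases lt_or_eq_of_le hle with h' | h'
    · exact h'
    · rw [h'] at h; omega
  · omega

theorem main_equiv : ∀ (value : Int) (keys : List Int) (keep_sign : Bool),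
    Pre_round_onto value keys keep_sign → ¬ D_round_onto value keys keep_sign →
    round_onto value keys keep_sign = round_onto_alt value keys keep_sign := by
  intro value keys keep_sign hne hD
  by_cases hvk : value ∈ keys
  · simp [round_onto, round_onto_alt, hvk]
  · obtain ⟨s, hs⟩ : ∃ s, s = PySem.List.sorted keys (fun k => k) false := ⟨_, rfl⟩
    obtain ⟨i, hi, hA, hB, hminB, hG1, hG2⟩ := anatomy value keys s hs hne
    have hperm : s.Perm keys := by
      rw [hs]; exact PySem.List.sorted_perm keys (fun k : Int => k) false
    have hmemS : ∀ z : Int, z ∈ s ↔ z ∈ keys := by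
      subst hs; exact PySem.List.mem_sorted keys (fun k => k) false
    have hmono : ∀ p q (hpq : p ≤ q) (hq : q < s.length),
        s[p]'(Nat.lt_of_le_of_lt hpq hq) ≤ s[q]'hq := by
      subst hs; intro p q hpq hq; exact PySem.List.sorted_id_getElem_mono keys hpq hq
    simp only [round_onto, round_onto_alt, if_neg hvk, ← hs, hA, hB]
    have hgd : PySem.List.pyGetD s (↑i) 0 = s[i]'hi := by
      rw [PySem.List.pyGetD_natCast]; exact List.getD_eq_getElem _ _ hi
    cases keep_sign with
    | false => simp [hgd]
    | true =>
      by_cases hv : value < 0 <;> by_cases hb : s[i]'hi < 0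
      · simp [hv, hb, hgd]
      · simp only [hgd, hv, hb, decide_true, decide_false, Bool.true_and, Bool.bne_false,
          Bool.bne_true, Bool.not_true, Bool.not_false, Bool.false_or, Bool.true_or,
          Bool.or_false, Bool.or_true, beq_false, beq_true, if_true, if_false, ite_true,
          ite_false, iff_true, iff_false, eq_self_iff_true, Bool.true_bne, Bool.false_bne]
        rw [if_neg (show ¬(false = true) by simp)]
        rcases Nat.eq_zero_or_pos i with hiz | hip
        · subst hiz
          rw [if_neg (show ¬(((0:Nat):Int) > 0) by simp), hgd]
          have hfil : List.filter (fun k => decide (k < s[0]'hi)) keys = [] := by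
            rw [List.filter_eq_nil_iff]
            intro k hk
            obtain ⟨j, hj, hje⟩ := List.mem_iff_getElem.mp ((hmemS k).mpr hk)
            have hle := hG2 j hj (by omega)
            rw [hje] at hle
            simp only [decide_eq_true_eq, not_lt]
            exact hle
          rw [hfil, PySem.List.maxD_nil]
        · rw [if_pos (show ((i:Int) > 0) by exact_mod_cast hip)]
          have hcast : ((i : Int) - 1) = ((i - 1 : Nat) : Int) := by omega
          rw [hcast, PySem.List.pyGetD_natCast,
            List.getD_eq_getElem _ _ (show i - 1 < s.length by omega)]
          have hpmem : s[i-1]'(by omega) ∈ List.filter (fun k => decide (k < s[i]'hi)) keys := by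
            rw [List.mem_filter]
            exact ⟨(hmemS _).mp (List.getElem_mem _), by simp [hG1 (i-1) (by omega) (by omega)]⟩
          have hfne : List.filter (fun k => decide (k < s[i]'hi)) keys ≠ [] := by
            intro h; rw [h] at hpmem; exact List.not_mem_nil hpmem
          obtain ⟨mx, hmx⟩ : ∃ mx, PySem.List.max?
              (List.filter (fun k => decide (k < s[i]'hi)) keys) (fun k : Int => k) = some mx := by
            cases hc : PySem.List.max? (List.filter (fun k => decide (k < s[i]'hi)) keys)
                (fun k : Int => k) with
            | none => exact absurd ((PySem.List.max?_eq_none_iff _ _).mp hc) hfne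
            | some mx => exact ⟨mx, rfl⟩
          simp only [PySem.List.maxD, hmx, Option.getD_some]
          have hmxf := PySem.List.max?_mem hmx
          rw [List.mem_filter] at hmxf
          obtain ⟨hmxk, hmxlt⟩ := hmxf
          simp only [decide_eq_true_eq] at hmxlt
          obtain ⟨j, hj, hje⟩ := List.mem_iff_getElem.mp ((hmemS mx).mpr hmxk)
          have hji : j < i := by
            by_contra h
            have := hG2 j hj (by omega)
            omega
          have h1 : mx ≤ s[i-1]'(by omega) := by
            rw [← hje]
            exact hmono j (i-1) (by omega) (by omega)
          have h2 : s[i-1]'(by omega) ≤ mx :=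
            PySem.List.max?_isMax hmx _ hpmem
          omega
      · simp only [hgd, hv, hb, decide_true, decide_false, Bool.true_and, Bool.bne_false,
          Bool.bne_true, Bool.not_true, Bool.not_false, Bool.false_or, Bool.true_or,
          Bool.or_false, Bool.or_true, beq_false, beq_true, if_true, if_false, ite_true,
          ite_false, iff_true, iff_false, eq_self_iff_true, Bool.true_bne, Bool.false_bne]
        rw [if_neg (show ¬(false = true) by simp)]
        rcases Nat.lt_or_ge (i+1) s.length with hlen | hlen
        · rw [if_pos (show ((i:Int) + 1 < (s.length:Int)) by push_cast; omega)]
          have hcast : ((i : Int) + 1) = ((i + 1 : Nat) : Int) := by omega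
          rw [hcast, PySem.List.pyGetD_natCast, List.getD_eq_getElem _ _ hlen]
          rcases eq_or_lt_of_le (hG2 (i+1) hlen (by omega)) with hw | hw
          · -- the next slot holds a duplicate of s[i]: ¬D forces no key above s[i]
            have hfil : List.filter (fun k => decide (s[i]'hi < k)) keys = [] := by
              rw [List.filter_eq_nil_iff]
              intro k hk
              simp only [decide_eq_true_eq, not_lt]
              by_contra hlt
              apply hD
              refine ⟨rfl, by omega, hvk, s[i]'hi, (hmemS _).mp (List.getElem_mem _), hb, ?_,
                ⟨k, hk, by omega⟩, ?_⟩
              · have hc2 := count_two s i hlen (s[i]'hi) rfl hw.symm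
                rw [hperm.count_eq] at hc2
                exact hc2
              · intro j hj
                have a1 : |s[i]'hi - value| = value - s[i]'hi := by
                  rw [abs_of_nonpos (by omega)]; ring
                by_cases hc : j ≤ value
                · have a2 : |j - value| = value - j := by rw [abs_of_nonpos (by omega)]; ring
                  rcases hminB j hj with h | ⟨h, hle⟩ <;> omega
                · have a2 : |j - value| = j - value := by rw [abs_of_nonneg (by omega)]
                  rcases hminB j hj with h | ⟨h, hle⟩ <;> omega
            rw [hfil, PySem.List.minD_nil]
            omega
          · -- strictly larger: s[i+1] is the least key above s[i]
            have hpmem : s[i+1]'hlen ∈ List.filter (fun k => decide (s[i]'hi < k)) keys := by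
              rw [List.mem_filter]
              exact ⟨(hmemS _).mp (List.getElem_mem _), by simp [hw]⟩
            have hfne : List.filter (fun k => decide (s[i]'hi < k)) keys ≠ [] := by
              intro h; rw [h] at hpmem; exact List.not_mem_nil hpmem
            obtain ⟨mn, hmn⟩ : ∃ mn, PySem.List.min?
                (List.filter (fun k => decide (s[i]'hi < k)) keys) (fun k : Int => k) = some mn := by
              cases hc : PySem.List.min? (List.filter (fun k => decide (s[i]'hi < k)) keys)
                  (fun k : Int => k) with
              | none => exact absurd ((PySem.List.min?_eq_none_iff _ _).mp hc) hfne
              | some mn => exact ⟨mn, rfl⟩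
            simp only [PySem.List.minD, hmn, Option.getD_some]
            have hmnf := PySem.List.min?_mem hmn
            rw [List.mem_filter] at hmnf
            obtain ⟨hmnk, hmngt⟩ := hmnf
            simp only [decide_eq_true_eq] at hmngt
            obtain ⟨j, hj, hje⟩ := List.mem_iff_getElem.mp ((hmemS mn).mpr hmnk)
            have hji : i + 1 ≤ j := by
              by_contra h
              have := hmono j i (by omega) hi
              omega
            have h1 : s[i+1]'hlen ≤ mn := by
              rw [← hje]
              exact hmono (i+1) j hji hj
            have h2 : mn ≤ s[i+1]'hlen :=
              PySem.List.min?_isMin hmn _ hpmem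
            omega
        · rw [if_neg (show ¬((i:Int) + 1 < (s.length:Int)) by push_cast; omega), hgd]
          have hfil : List.filter (fun k => decide (s[i]'hi < k)) keys = [] := by
            rw [List.filter_eq_nil_iff]
            intro k hk
            obtain ⟨j, hj, hje⟩ := List.mem_iff_getElem.mp ((hmemS k).mpr hk)
            have hle := hmono j i (by omega) hi
            rw [hje] at hle
            simp only [decide_eq_true_eq, not_lt]
            exact hle
          rw [hfil, PySem.List.minD_nil]
      · simp [hv, hb, hgd]
-- ===== VERDICT (by name: the statement is the Claim_ definition above) =====
theorem round_onto_spec : Claim_unchanged_round_onto := by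
  intro value keys keep_sign _ hpre
  intro hD
  exact main_equiv value keys keep_sign hpre hD

theorem round_onto_changed : Claim_changed_round_onto := by unfold Claim_changed_round_onto; decide

theorem round_onto_tight : Claim_exact_round_onto := by
  unfold Claim_exact_round_onto
  intro value keys keep_sign _ hne hD
  obtain ⟨hks, hv0, hvk, b', hb'K, hb'neg, hb'cnt, ⟨k0, hk0K, hk0gt⟩, hb'min⟩ := hD
  subst hks
  obtain ⟨s, hs⟩ : ∃ s, s = PySem.List.sorted keys (fun k => k) false := ⟨_, rfl⟩
  obtain ⟨i, hi, hA, hB, hminB, hG1, hG2⟩ := anatomy value keys s hs hne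
  have hperm : s.Perm keys := by
    rw [hs]; exact PySem.List.sorted_perm keys (fun k : Int => k) false
  have hmemS : ∀ z : Int, z ∈ s ↔ z ∈ keys := by
    subst hs; exact PySem.List.mem_sorted keys (fun k => k) false
  have hmono : ∀ p q (hpq : p ≤ q) (hq : q < s.length),
      s[p]'(Nat.lt_of_le_of_lt hpq hq) ≤ s[q]'hq := by
    subst hs; intro p q hpq hq; exact PySem.List.sorted_id_getElem_mono keys hpq hq
  -- the key b' named by D_ is exactly the common nearest key s[i]
  have hb'b : b' = s[i]'hi := by
    have h2 := hb'min (s[i]'hi) ((hmemS _).mp (List.getElem_mem hi))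
    have h1 := hminB b' hb'K
    have a1 : |b' - value| = value - b' := by rw [abs_of_nonpos (by omega)]; ring
    rcases h2 with h2 | h2
    · have a2 : |s[i]'hi - value| = value - s[i]'hi := by
        rw [abs_of_nonpos (by omega)]; ring
      rcases h1 with h | ⟨h, hle⟩ <;> omega
    · have a2 : |s[i]'hi - value| = s[i]'hi - value := by rw [abs_of_nonneg (by omega)]
      rcases h1 with h | ⟨h, hle⟩ <;> omega
  subst hb'b
  have hcntS : 2 ≤ s.count (s[i]'hi) := by
    rw [hperm.count_eq]; exact hb'cnt
  have hi1 : i + 1 < s.length := by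
    by_contra hlen
    have := count_le_one s i hi _ rfl (fun j hj hji => ne_of_lt (hG1 j hj hji))
      (fun j hj hji => absurd hj (by omega))
    omega
  have hsi1 : s[i+1]'hi1 = s[i]'hi := by
    rcases eq_or_lt_of_le (hG2 (i+1) hi1 (by omega)) with h | h
    · exact h.symm
    · exfalso
      have := count_le_one s i hi _ rfl (fun j hj hji => ne_of_lt (hG1 j hj hji))
        (fun j hj hji => ne_of_gt (lt_of_lt_of_le h (hmono (i+1) j (by omega) hj)))
      omega
  simp only [round_onto, round_onto_alt, if_neg hvk, ← hs, hA, hB]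
  have hgd : PySem.List.pyGetD s (↑i) 0 = s[i]'hi := by
    rw [PySem.List.pyGetD_natCast]; exact List.getD_eq_getElem _ _ hi
  have hv : ¬ value < 0 := by omega
  have hb : s[i]'hi < 0 := hb'neg
  simp only [hgd, hv, hb, decide_true, decide_false, Bool.true_and, Bool.bne_false,
    Bool.bne_true, Bool.not_true, Bool.not_false, Bool.false_or, Bool.true_or,
    Bool.or_false, Bool.or_true, beq_false, beq_true, if_true, if_false, ite_true,
    ite_false, iff_true, iff_false, eq_self_iff_true, Bool.true_bne, Bool.false_bne]
  rw [if_neg (show ¬(false = true) by simp)]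
  rw [if_pos (show ((i:Int) + 1 < (s.length:Int)) by push_cast; omega)]
  have hcast : ((i : Int) + 1) = ((i + 1 : Nat) : Int) := by omega
  rw [hcast, PySem.List.pyGetD_natCast, List.getD_eq_getElem _ _ hi1]
  have hpmem : k0 ∈ List.filter (fun k => decide (s[i]'hi < k)) keys := by
    rw [List.mem_filter]
    exact ⟨hk0K, by simp [hk0gt]⟩
  have hfne : List.filter (fun k => decide (s[i]'hi < k)) keys ≠ [] := by
    intro h; rw [h] at hpmem; exact List.not_mem_nil hpmem
  obtain ⟨mn, hmn⟩ : ∃ mn, PySem.List.min?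
      (List.filter (fun k => decide (s[i]'hi < k)) keys) (fun k : Int => k) = some mn := by
    cases hc : PySem.List.min? (List.filter (fun k => decide (s[i]'hi < k)) keys)
        (fun k : Int => k) with
    | none => exact absurd ((PySem.List.min?_eq_none_iff _ _).mp hc) hfne
    | some mn => exact ⟨mn, rfl⟩
  simp only [PySem.List.minD, hmn, Option.getD_some]
  have hmnf := PySem.List.min?_mem hmn
  rw [List.mem_filter] at hmnf
  obtain ⟨hmnk, hmngt⟩ := hmnf
  simp only [decide_eq_true_eq] at hmngt
  rw [hsi1]
  exact ne_of_lt hmngt
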